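-- pv_equiv track=rewrite | github.com/mhagdorn/gitlab-learning-scripts | gitlab_course/checkcourse.py | check_for_doubles
-- ===== SOURCE A (Python) =====
-- def check_for_doubles(list1, list2=[]):
--     sorted_list = sorted([p.strip().lower() for p in list1 + list2])
--     doubles = []
--     if len(sorted_list) != len(set(sorted_list)):
--         for i in range(1, len(sorted_list)):
--             if sorted_list[i] == sorted_list[i - 1]:
--                 doubles.append(sorted_list[i])
--     return doubles
-- ===== SOURCE B (Python) =====
-- def check_for_doubles(list1, list2=[]):
--     counts = {}
--     for p in list1 + list2:
--         key = p.strip().lower()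
--         counts[key] = counts.get(key, 0) + 1
--     doubles = []
--     for item in sorted(counts):
--         doubles += [item] * (counts[item] - 1)
--     return doubles
-- ===== Notes on version B (the rewrite author's own statement) =====
-- stated objective: idiomatic
-- what changed: Replaced the sort-whole-list + adjacent-pair index scan (guarded by a set-length comparison) with a count table built in one pass and a single pass over the sorted distinct keys emitting each key count-1 times.
import Mathlib
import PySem

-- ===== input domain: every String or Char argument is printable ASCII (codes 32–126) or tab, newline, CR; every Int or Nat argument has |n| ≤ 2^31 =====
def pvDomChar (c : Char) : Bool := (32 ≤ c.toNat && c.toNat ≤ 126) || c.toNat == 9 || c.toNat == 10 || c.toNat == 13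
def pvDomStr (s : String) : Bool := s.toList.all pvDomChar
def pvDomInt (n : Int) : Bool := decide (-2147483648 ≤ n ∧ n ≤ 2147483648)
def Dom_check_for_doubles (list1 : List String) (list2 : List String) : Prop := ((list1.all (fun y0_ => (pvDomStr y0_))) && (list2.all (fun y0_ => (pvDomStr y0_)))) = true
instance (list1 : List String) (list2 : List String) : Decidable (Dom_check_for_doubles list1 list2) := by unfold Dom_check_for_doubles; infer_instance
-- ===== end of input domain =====

-- B builds a count table in one pass and emits each sorted distinct key count-1 times,
-- instead of A's sort-the-whole-list + adjacent-pair index scan; objective: idiomatic.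

-- ===== PORT A =====
def check_for_doubles (list1 : List String) (list2 : List String) : List String :=
  let sorted_list := PySem.List.sorted ((list1 ++ list2).map (fun p => PySem.Str.lower (PySem.Str.strip p))) (fun x => x) false
  if sorted_list.length ≠ (PySem.Set.ofList sorted_list).length then
    (PySem.List.pyRange 1 (sorted_list.length : Int) 1).foldl
      (fun doubles i =>
        if PySem.List.pyGetD sorted_list i "" == PySem.List.pyGetD sorted_list (i - 1) "" then
          doubles ++ [PySem.List.pyGetD sorted_list i ""]
        else doubles) []
  else []

-- ===== PORT B =====
def check_for_doubles_alt (list1 : List String) (list2 : List String) : List String :=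
  let counts := (list1 ++ list2).foldl
    (fun d p =>
      let key := PySem.Str.lower (PySem.Str.strip p)
      d.insert key (d.getD key 0 + 1)) PySem.Dict.empty
  (PySem.List.sorted counts.keys (fun x => x) false).foldl
    (fun doubles item => doubles ++ PySem.List.pyRepeat [item] (counts.getD item 0 - 1)) []

-- ===== PRECONDITION & SPEC =====
def Spec_check_for_doubles (list1 : List String) (list2 : List String) (out : List String) : Prop := out = check_for_doubles_alt list1 list2
instance (list1 : List String) (list2 : List String) (out : List String) : Decidable (Spec_check_for_doubles list1 list2 out) := by unfold Spec_check_for_doubles; infer_instance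

-- ===== CLAIM (what is proved, stated in full; the proofs are below) =====
def Claim_equal_check_for_doubles : Prop := ∀ (list1 : List String) (list2 : List String), Dom_check_for_doubles list1 list2 → Spec_check_for_doubles list1 list2 (check_for_doubles list1 list2)

-- ===== LEMMAS AND PROOFS =====

-- A's adjacent-duplicate scan, in structural form
def pvAdj : List String → List String
  | [] => []
  | [_] => []
  | a :: b :: t => (if b = a then [b] else []) ++ pvAdj (b :: t)

-- the index range [1, len) read as the list of (previous, current) pairs
theorem pv_map_range (L : List String) :
    (PySem.List.pyRange 1 (L.length : Int) 1).map
      (fun i => (PySem.List.pyGetD L (i - 1) "", PySem.List.pyGetD L i "")) = L.zip L.tail := by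
  apply List.ext_getElem
  · simp [PySem.List.length_pyRange_one]
  · intro k h1 h2
    have hk : k + 1 < L.length := by
      simp [PySem.List.length_pyRange_one] at h1; omega
    simp only [List.getElem_map, PySem.List.getElem_pyRange_one]
    have e1 : (1 : Int) + (k : Int) - 1 = ((k : Nat) : Int) := by omega
    have e2 : (1 : Int) + (k : Int) = (((k + 1 : Nat)) : Int) := by omega
    rw [e1, e2, PySem.List.pyGetD_natCast, PySem.List.pyGetD_natCast]
    rw [List.getElem_zip]
    rw [List.getD_eq_getElem L "" (by omega), List.getD_eq_getElem L "" (by omega)]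
    congr 1
    rw [List.getElem_tail]

-- the (prev, cur)-pair filter is pvAdj
theorem pv_fz (L : List String) :
    ((L.zip L.tail).filter (fun p => p.2 == p.1)).map Prod.snd = pvAdj L := by
  induction L with
  | nil => rfl
  | cons a t ih =>
    cases t with
    | nil => rfl
    | cons b t' =>
      simp only [List.tail_cons] at ih ⊢
      rw [List.zip_cons_cons, List.filter_cons]
      by_cases h : b = a
      · subst h
        simp [pvAdj, ih]
      · simp only [pvAdj, if_neg h]
        have : (((a, b) : String × String).2 == (a, b).1) = false := by
          simp [h]
        rw [this]
        simpa using ih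

-- A's loop over indices equals pvAdj of the list
theorem pv_loop_eq_adj (L : List String) :
    (PySem.List.pyRange 1 (L.length : Int) 1).foldl
      (fun doubles i =>
        if PySem.List.pyGetD L i "" == PySem.List.pyGetD L (i - 1) "" then
          doubles ++ [PySem.List.pyGetD L i ""]
        else doubles) [] = pvAdj L := by
  have h1 : (PySem.List.pyRange 1 (L.length : Int) 1).foldl
      (fun doubles i =>
        if PySem.List.pyGetD L i "" == PySem.List.pyGetD L (i - 1) "" then
          doubles ++ [PySem.List.pyGetD L i ""]
        else doubles) []
      = ((PySem.List.pyRange 1 (L.length : Int) 1).map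
          (fun i => (PySem.List.pyGetD L (i - 1) "", PySem.List.pyGetD L i ""))).foldl
          (fun acc p => if p.2 == p.1 then acc ++ [p.2] else acc) [] :=
    (List.foldl_map
      (f := fun i => (PySem.List.pyGetD L (i - 1) "", PySem.List.pyGetD L i ""))
      (g := fun (acc : List String) (p : String × String) =>
        if p.2 == p.1 then acc ++ [p.2] else acc)).symm
  rw [h1, pv_map_range L, PySem.List.foldl_append_if (fun p => p.2 == p.1) Prod.snd]
  simpa using pv_fz L

-- one block of equal values followed by nothing or a different value
theorem pv_adj_block (n : Nat) (k : String) (rest : List String)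
    (hn : 0 < n) (hrest : rest = [] ∨ ∃ r t, rest = r :: t ∧ r ≠ k) :
    pvAdj (List.replicate n k ++ rest) = List.replicate (n - 1) k ++ pvAdj rest := by
  induction n with
  | zero => omega
  | succ m ih =>
    rcases Nat.eq_zero_or_pos m with h0 | hm
    · subst h0
      rcases hrest with h | ⟨r, t, hrt, hne⟩
      · subst h; rfl
      · subst hrt
        simp [pvAdj, hne]
    · have hm1 : List.replicate m k ++ rest = k :: (List.replicate (m - 1) k ++ rest) := by
        cases m with
        | zero => omega
        | succ m' => simp [List.replicate_succ]
      rw [List.replicate_succ, List.cons_append]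
      have : pvAdj (k :: (List.replicate m k ++ rest))
          = [k] ++ pvAdj (List.replicate m k ++ rest) := by
        rw [hm1]
        simp [pvAdj]
      rw [this, ih hm]
      have : List.replicate (m + 1 - 1) k = k :: List.replicate (m - 1) k := by
        cases m with
        | zero => omega
        | succ m' => simp [List.replicate_succ]
      rw [this]
      simp

-- grouping: the scan over strictly-increasing blocks emits each key count-1 times
theorem pv_adj_flatMap (K : List String) (c : String → Nat)
    (hpw : K.Pairwise (· < ·)) (hpos : ∀ k ∈ K, 0 < c k) :
    pvAdj (K.flatMap fun k => List.replicate (c k) k)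
      = K.flatMap (fun k => List.replicate (c k - 1) k) := by
  induction K with
  | nil => rfl
  | cons k K' ih =>
    simp only [List.flatMap_cons]
    have hrest : K'.flatMap (fun k => List.replicate (c k) k) = []
        ∨ ∃ r t, K'.flatMap (fun k => List.replicate (c k) k) = r :: t ∧ r ≠ k := by
      cases K' with
      | nil => left; rfl
      | cons k' K'' =>
        right
        have hc : 0 < c k' := hpos k' (by simp)
        have hlt : k < k' := (List.pairwise_cons.mp hpw).1 k' (by simp)
        refine ⟨k', List.replicate (c k' - 1) k' ++ K''.flatMap (fun k => List.replicate (c k) k), ?_, ?_⟩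
        · simp only [List.flatMap_cons]
          have : List.replicate (c k') k' = k' :: List.replicate (c k' - 1) k' := by
            cases hc' : c k' with
            | zero => omega
            | succ m => simp [List.replicate_succ]
          rw [this]; rfl
        · exact ne_of_gt hlt
    rw [pv_adj_block (c k) k _ (hpos k (by simp)) hrest]
    rw [ih hpw.of_cons (fun x hx => hpos x (List.mem_cons_of_mem _ hx))]

-- count of a value in the flatMap of replicates over distinct keys
theorem pv_count_flatMap (K : List String) (c : String → Nat) (hnd : K.Nodup) (v : String) :
    (K.flatMap fun k => List.replicate (c k) k).count v = if v ∈ K then c v else 0 := by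
  induction K with
  | nil => simp
  | cons k K' ih =>
    simp only [List.flatMap_cons, List.count_append, List.count_replicate]
    rw [ih hnd.of_cons]
    by_cases hv : v = k
    · subst hv
      have : v ∉ K' := (List.nodup_cons.mp hnd).1
      simp [this]
    · have : (k == v) = false := by simp [Ne.symm hv]
      simp [this, hv]

-- the flatMap of replicates over strictly-increasing keys is ≤-sorted
theorem pv_pairwise_flatMap (K : List String) (c : String → Nat)
    (hpw : K.Pairwise (· < ·)) :
    (K.flatMap fun k => List.replicate (c k) k).Pairwise (· ≤ ·) := by
  induction K with
  | nil => simp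
  | cons k K' ih =>
    simp only [List.flatMap_cons]
    rw [List.pairwise_append]
    refine ⟨List.pairwise_replicate.mpr (Or.inr le_rfl), ih hpw.of_cons, ?_⟩
    intro a ha b hb
    obtain rfl : a = k := List.eq_of_mem_replicate ha
    obtain ⟨k', hk', hb'⟩ := List.mem_flatMap.mp hb
    obtain rfl : b = k' := List.eq_of_mem_replicate hb'
    exact le_of_lt ((List.pairwise_cons.mp hpw).1 b hk')

-- the sorted list is its sorted distinct keys, each repeated its multiplicity
theorem pv_sorted_eq_flatMap (xs : List String) :
    PySem.List.sorted xs (fun x => x) false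
      = (PySem.List.sorted (PySem.Set.ofList xs) (fun x => x) false).flatMap
          (fun k => List.replicate (xs.count k) k) := by
  have hK : (PySem.List.sorted (PySem.Set.ofList xs) (fun x => x) false).Pairwise (· < ·) :=
    PySem.List.sorted_ofList_pairwise_lt xs
  have hKnd : (PySem.List.sorted (PySem.Set.ofList xs) (fun x => x) false).Nodup :=
    hK.imp ne_of_lt
  have hmemK : ∀ v, v ∈ PySem.List.sorted (PySem.Set.ofList xs) (fun x => x) false ↔ v ∈ xs := by
    intro v
    rw [PySem.List.mem_sorted, PySem.Set.mem_ofList]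
  apply PySem.List.eq_of_perm_of_pairwise_le_of_injective (fun x => x) (fun a b h => h)
  · apply (PySem.List.sorted_perm xs _ _).trans
    rw [List.perm_iff_count]
    intro v
    rw [pv_count_flatMap _ _ hKnd v]
    by_cases hv : v ∈ xs
    · simp [(hmemK v).mpr hv]
    · have hvK : v ∉ PySem.List.sorted (PySem.Set.ofList xs) (fun x => x) false :=
        fun hm => hv ((hmemK v).mp hm)
      simp [hvK, List.count_eq_zero_of_not_mem hv]
  · exact PySem.List.sorted_pairwise xs _
  · exact pv_pairwise_flatMap _ _ hK

-- equal lengths of the list and its set of values force distinctness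
theorem pv_nodup_of_len (L : List String) (h : L.length = (PySem.Set.ofList L).length) : L.Nodup := by
  have hperm : (PySem.Set.ofList L).Perm L.dedup := by
    rw [List.perm_ext_iff_of_nodup (PySem.Set.nodup_ofList L) (List.nodup_dedup L)]
    intro a
    rw [PySem.Set.mem_ofList, List.mem_dedup]
  have hlen : L.dedup.length = L.length := by rw [← hperm.length_eq, ← h]
  exact List.dedup_eq_self.mp ((List.dedup_sublist L).eq_of_length hlen)

-- no adjacent duplicates in a duplicate-free list
theorem pv_adj_nodup (L : List String) (h : L.Nodup) : pvAdj L = [] := by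
  induction L with
  | nil => rfl
  | cons a t ih =>
    cases t with
    | nil => rfl
    | cons b t' =>
      have hne : b ≠ a := fun hba => (List.nodup_cons.mp h).1 (hba ▸ List.mem_cons_self)
      simp only [pvAdj, if_neg hne, List.nil_append]
      exact ih (List.nodup_cons.mp h).2

-- ===== VERDICT (by name: the statement is the Claim_ definition above) =====
theorem check_for_doubles_spec : Claim_equal_check_for_doubles := by
  intro list1 list2 _
  unfold Spec_check_for_doubles check_for_doubles check_for_doubles_alt
  set xs := (list1 ++ list2).map (fun p => PySem.Str.lower (PySem.Str.strip p)) with hxs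
  have hcounts : (list1 ++ list2).foldl
      (fun d p =>
        let key := PySem.Str.lower (PySem.Str.strip p)
        d.insert key (d.getD key 0 + 1)) PySem.Dict.empty = PySem.Dict.counter xs := by
    rw [← PySem.Dict.foldl_insert_getD_add_one_eq_counter]
    exact (List.foldl_map
      (f := fun p => PySem.Str.lower (PySem.Str.strip p))
      (g := fun (d : PySem.Dict String Int) (k : String) => d.insert k (d.getD k 0 + 1))).symm
  rw [hcounts]
  simp only [PySem.Dict.keys_counter, PySem.Dict.getD_counter, PySem.List.pyRepeat_singleton]
  rw [PySem.List.foldl_append_eq_flatMap]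
  have htoNat : ∀ k : String, ((xs.count k : Int) - 1).toNat = xs.count k - 1 := by
    intro k; omega
  simp only [htoNat, List.nil_append]
  have hK : (PySem.List.sorted (PySem.Set.ofList xs) (fun x => x) false).Pairwise (· < ·) :=
    PySem.List.sorted_ofList_pairwise_lt xs
  have hpos : ∀ k ∈ PySem.List.sorted (PySem.Set.ofList xs) (fun x => x) false, 0 < xs.count k := by
    intro k hk
    exact List.count_pos_iff.mpr ((PySem.Set.mem_ofList xs k).mp ((PySem.List.mem_sorted _ _ _ _).mp hk))
  have hmain : pvAdj (PySem.List.sorted xs (fun x => x) false)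
      = (PySem.List.sorted (PySem.Set.ofList xs) (fun x => x) false).flatMap
          (fun k => List.replicate (xs.count k - 1) k) := by
    rw [pv_sorted_eq_flatMap xs]
    exact pv_adj_flatMap _ _ hK hpos
  split_ifs with h
  · rw [pv_loop_eq_adj]
    exact hmain
  · have hnd : (PySem.List.sorted xs (fun x => x) false).Nodup :=
      pv_nodup_of_len _ (not_ne_iff.mp h)
    rw [← hmain, pv_adj_nodup _ hnd]
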